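-- pv_equiv track=rewrite | github.com/JaLi-CZ/SJRako-AI-Lunch-Selector | sjrako.py | __remove_brackets_from_lunch
-- ===== SOURCE A (Python) =====
-- def __remove_brackets_from_lunch(lunch: str) -> str:
--     parentheses, square_brackets = False, False
--     s = ""
--     for c in lunch:
--         if parentheses:
--             if c == ')':
--                 parentheses = False
--         elif square_brackets:
--             if c == ']':
--                 square_brackets = False
--         elif c == '(':
--             parentheses = True
--         elif c == '[':
--             square_brackets = True
--         else:
--             s += c
--     return s.strip()
-- ===== SOURCE B (Python) =====
-- def __remove_brackets_from_lunch(lunch: str) -> str: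
--     out = []
--     i, n = 0, len(lunch)
--     while i < n:
--         c = lunch[i]
--         if c == '(':
--             j = lunch.find(')', i + 1)
--             i = n if j == -1 else j + 1
--         elif c == '[':
--             j = lunch.find(']', i + 1)
--             i = n if j == -1 else j + 1
--         else:
--             out.append(c)
--             i += 1
--     return ''.join(out).strip()
-- ===== Notes on version B (the rewrite author's own statement) =====
-- stated objective: alternative
-- what changed: Replaces A's per-character boolean state machine by an index-jumping scan that, on an opener, skips the whole bracketed span at once with str.find and otherwise copies characters into a list joined at the end.
import Mathlib
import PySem

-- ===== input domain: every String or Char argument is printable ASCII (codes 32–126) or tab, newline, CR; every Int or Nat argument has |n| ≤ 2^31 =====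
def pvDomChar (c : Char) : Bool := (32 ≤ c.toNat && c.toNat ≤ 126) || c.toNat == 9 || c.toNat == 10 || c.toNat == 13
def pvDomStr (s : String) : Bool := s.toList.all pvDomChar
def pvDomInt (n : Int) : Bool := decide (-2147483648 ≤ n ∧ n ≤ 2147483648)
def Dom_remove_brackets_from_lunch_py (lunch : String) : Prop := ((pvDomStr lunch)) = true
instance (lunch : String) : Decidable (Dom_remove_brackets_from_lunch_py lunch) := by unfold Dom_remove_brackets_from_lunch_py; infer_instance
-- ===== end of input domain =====

-- B replaces A's per-character boolean state machine by an index-jumping scan that skips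
-- each bracketed span at once (via find); objective: alternative structure, same cost.

-- ===== PORT A =====
-- A's for-loop with state (parentheses, square_brackets, s), transliterated as structural
-- recursion over the characters with the same three state components.
def pvALoop : List Char → Bool → Bool → List Char → List Char
  | [], _, _, s => s
  | c :: rest, par, sq, s =>
    if par then
      if c = ')' then pvALoop rest false sq s else pvALoop rest par sq s
    else if sq then
      if c = ']' then pvALoop rest par false s else pvALoop rest par sq s
    else if c = '(' then pvALoop rest true sq s
    else if c = '[' then pvALoop rest par true s
    else pvALoop rest par sq (s ++ [c])

def remove_brackets_from_lunch_py (lunch : String) : String :=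
  String.ofList (PySem.Chars.strip (pvALoop lunch.toList false false []))

-- ===== PORT B =====
-- B's `lunch.find(close, i+1)` followed by the jump `i = n if j == -1 else j+1`:
-- drop the characters up to and through the first occurrence of the closer (all if absent).
def pvDropThrough (t : Char) : List Char → List Char
  | [] => []
  | c :: rest => if c = t then rest else pvDropThrough t rest

theorem pvDropThrough_length_le (t : Char) : ∀ cs : List Char, (pvDropThrough t cs).length ≤ cs.length
  | [] => Nat.le_refl _
  | c :: rest => by
    simp only [pvDropThrough]
    split
    · exact Nat.le_succ _
    · exact Nat.le_succ_of_le (pvDropThrough_length_le t rest)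

-- B's while-loop: copy a plain character, or jump past a whole bracketed span.
def pvBGo : List Char → List Char
  | [] => []
  | c :: rest =>
    if c = '(' then pvBGo (pvDropThrough ')' rest)
    else if c = '[' then pvBGo (pvDropThrough ']' rest)
    else c :: pvBGo rest
termination_by cs => cs.length
decreasing_by
  · exact Nat.lt_succ_of_le (pvDropThrough_length_le ')' rest)
  · exact Nat.lt_succ_of_le (pvDropThrough_length_le ']' rest)
  · exact Nat.lt_succ_self _

def remove_brackets_from_lunch_py_alt (lunch : String) : String :=
  String.ofList (PySem.Chars.strip (pvBGo lunch.toList))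

-- ===== PRECONDITION & SPEC =====
def Spec_remove_brackets_from_lunch_py (lunch : String) (out : String) : Prop := out = remove_brackets_from_lunch_py_alt lunch
instance (lunch : String) (out : String) : Decidable (Spec_remove_brackets_from_lunch_py lunch out) := by unfold Spec_remove_brackets_from_lunch_py; infer_instance

-- ===== CLAIM (what is proved, stated in full; the proofs are below) =====
def Claim_equal_remove_brackets_from_lunch_py : Prop := ∀ (lunch : String), Dom_remove_brackets_from_lunch_py lunch → Spec_remove_brackets_from_lunch_py lunch (remove_brackets_from_lunch_py lunch)

-- ===== LEMMAS AND PROOFS =====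

-- while parentheses == True, A just scans for ')' — i.e. it drops through the first ')'
theorem pvALoop_par (s : List Char) : ∀ cs : List Char,
    pvALoop cs true false s = pvALoop (pvDropThrough ')' cs) false false s
  | [] => rfl
  | c :: rest => by
    by_cases h : c = ')'
    · simp [pvALoop, pvDropThrough, h]
    · simp only [pvALoop, pvDropThrough, if_neg h]
      exact pvALoop_par s rest

-- while square_brackets == True, A just scans for ']'
theorem pvALoop_sq (s : List Char) : ∀ cs : List Char,
    pvALoop cs false true s = pvALoop (pvDropThrough ']' cs) false false s
  | [] => rfl
  | c :: rest => by
    by_cases h : c = ']'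
    · simp [pvALoop, pvDropThrough, h]
    · simp only [pvALoop, pvDropThrough, Bool.false_eq_true, if_false, if_neg h]
      exact pvALoop_sq s rest

-- in the neutral state A's accumulator grows exactly by B's output
theorem pvALoop_eq_bGo : ∀ (cs : List Char) (s : List Char),
    pvALoop cs false false s = s ++ pvBGo cs
  | [], s => by simp [pvALoop, pvBGo]
  | c :: rest, s => by
    by_cases hp : c = '('
    · have h2 := pvALoop_eq_bGo (pvDropThrough ')' rest) s
      simp [pvALoop, pvBGo, hp, pvALoop_par, h2]
    · by_cases hq : c = '['
      · have h2 := pvALoop_eq_bGo (pvDropThrough ']' rest) s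
        simp [pvALoop, pvBGo, hq, pvALoop_sq, h2]
      · have h2 := pvALoop_eq_bGo rest (s ++ [c])
        simp [pvALoop, pvBGo, hp, hq, h2]
termination_by cs _ => cs.length
decreasing_by
  · exact Nat.lt_succ_of_le (pvDropThrough_length_le ')' rest)
  · exact Nat.lt_succ_of_le (pvDropThrough_length_le ']' rest)
  · exact Nat.lt_succ_self _

-- ===== VERDICT (by name: the statement is the Claim_ definition above) =====
theorem remove_brackets_from_lunch_py_spec : Claim_equal_remove_brackets_from_lunch_py := by
  intro lunch _
  unfold Spec_remove_brackets_from_lunch_py remove_brackets_from_lunch_py remove_brackets_from_lunch_py_alt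
  rw [pvALoop_eq_bGo, List.nil_append]
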